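-- pv_equiv track=rewrite | github.com/divergentdave/registrars | lambda/registrars/build.py | clean_registrar_dict
-- ===== SOURCE A (Python) =====
-- ALLOWED_KEYS = {
--     "osm_name",
--     "url_format",
--     "coordinate_wkt",
--     "epsilon",
-- }
--
-- DROP_KEYS = {
--     "software",
-- }
--
-- def clean_registrar_dict(registrar_dict):
--     registrar_dict = dict(
--         (key, value) for (key, value) in registrar_dict.items()
--         if key not in DROP_KEYS
--     )
--     for key in registrar_dict:
--         if key not in ALLOWED_KEYS:
--             raise Exception("Unexpected key: {}".format(key))
--     return registrar_dict
-- ===== SOURCE B (Python) =====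
-- ALLOWED_KEYS = {
--     "osm_name",
--     "url_format",
--     "coordinate_wkt",
--     "epsilon",
-- }
--
-- DROP_KEYS = {
--     "software",
-- }
--
-- def _clean_items(items):
--     # recursion on the item list: clean the tail first, then merge the head
--     # pair underneath it with a dict display ({head, **rest}: the head key
--     # comes first, a duplicate in the rest overwrites its value in place)
--     if not items:
--         return {}
--     key, value = items[0]
--     if key in DROP_KEYS:
--         return _clean_items(items[1:])
--     if key not in ALLOWED_KEYS:
--         raise Exception("Unexpected key: {}".format(key))
--     return {key: value, **_clean_items(items[1:])}
--
-- def clean_registrar_dict(registrar_dict):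
--     return _clean_items(list(registrar_dict.items()))
-- ===== Notes on version B (the rewrite author's own statement) =====
-- stated objective: alternative
-- what changed: B replaces A's filter-comprehension-then-validation-loop over a dict built up front by structural recursion on the item list: it cleans the tail recursively and merges the head pair underneath the cleaned tail with a dict display {key: value, **rest}, building the result back-to-front instead of by left-to-right insertion.
import Mathlib
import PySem

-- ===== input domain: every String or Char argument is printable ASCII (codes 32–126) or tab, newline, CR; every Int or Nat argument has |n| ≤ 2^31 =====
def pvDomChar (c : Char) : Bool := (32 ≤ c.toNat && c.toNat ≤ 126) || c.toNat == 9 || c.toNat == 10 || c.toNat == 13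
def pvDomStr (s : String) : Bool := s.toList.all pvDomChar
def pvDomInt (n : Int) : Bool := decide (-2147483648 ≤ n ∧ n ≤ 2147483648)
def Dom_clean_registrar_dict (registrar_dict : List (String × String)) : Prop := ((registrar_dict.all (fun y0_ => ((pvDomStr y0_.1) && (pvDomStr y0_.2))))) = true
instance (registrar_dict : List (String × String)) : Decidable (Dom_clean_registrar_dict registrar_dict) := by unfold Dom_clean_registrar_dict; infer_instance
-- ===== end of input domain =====

-- B replaces A's filter-comprehension-plus-validation-loop by structural recursion on
-- the item list, rebuilding the result back-to-front with a dict-display merge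
-- {key: value, **rest}; same return value, different decomposition.

-- ===== PORT A =====
def pvAllowedKeys : List String := ["osm_name", "url_format", "coordinate_wkt", "epsilon"]
def pvDropKeys : List String := ["software"]

-- dict((k, v) for (k, v) in d.items() if k not in DROP_KEYS): insert the filtered
-- pairs in order; the subsequent 'for key in registrar_dict' loop only raises on a
-- key outside ALLOWED_KEYS (those inputs are excluded by Pre_) and is otherwise a no-op.
def clean_registrar_dict (registrar_dict : List (String × String)) : List (String × String) :=
  let d := (registrar_dict.filter (fun kv => !(pvDropKeys.contains kv.1))).foldl
      (fun d kv => d.insert kv.1 kv.2) PySem.Dict.empty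
  d.items

-- ===== PORT B =====
-- _clean_items: recursion on the items; {key: value, **rest} is the singleton dict
-- {key: value} updated with every pair of rest in order (dict-display semantics).
-- The 'raise' on an unexpected key has no value; those inputs are excluded by Pre_.
def pvCleanItems : List (String × String) → PySem.Dict String String
  | [] => PySem.Dict.empty
  | (key, value) :: rest =>
    if pvDropKeys.contains key then pvCleanItems rest
    else (pvCleanItems rest).items.foldl (fun d kv => d.insert kv.1 kv.2)
      (PySem.Dict.empty.insert key value)

def clean_registrar_dict_alt (registrar_dict : List (String × String)) : List (String × String) :=
  (pvCleanItems registrar_dict).items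

-- ===== PRECONDITION & SPEC =====
-- Pre_ excludes exactly the inputs on which A raises Exception("Unexpected key: …"):
-- a key neither in DROP_KEYS nor in ALLOWED_KEYS.  (B raises there too.)
def Pre_clean_registrar_dict (registrar_dict : List (String × String)) : Prop :=
  (registrar_dict.all (fun kv => pvDropKeys.contains kv.1 || pvAllowedKeys.contains kv.1)) = true
instance (registrar_dict : List (String × String)) : Decidable (Pre_clean_registrar_dict registrar_dict) := by unfold Pre_clean_registrar_dict; infer_instance
def pvWitness_clean_registrar_dict : (List (String × String)) :=
  [("software", "x"), ("osm_name", "name"), ("epsilon", "0.1")]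

def Spec_clean_registrar_dict (registrar_dict : List (String × String)) (out : List (String × String)) : Prop := out = clean_registrar_dict_alt registrar_dict
instance (registrar_dict : List (String × String)) (out : List (String × String)) : Decidable (Spec_clean_registrar_dict registrar_dict out) := by unfold Spec_clean_registrar_dict; infer_instance

-- ===== CLAIM (what is proved, stated in full; the proofs are below) =====
def Claim_equal_clean_registrar_dict : Prop := ∀ (registrar_dict : List (String × String)), Dom_clean_registrar_dict registrar_dict → Pre_clean_registrar_dict registrar_dict → Spec_clean_registrar_dict registrar_dict (clean_registrar_dict registrar_dict)

-- ===== LEMMAS AND PROOFS =====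
-- abbreviation used throughout: one insertion step of both folds
def pvIns (d : PySem.Dict String String) (kv : String × String) : PySem.Dict String String :=
  d.insert kv.1 kv.2

-- A's guarded fold (filter fused into the fold)
def pvFoldA (d : PySem.Dict String String) (l : List (String × String)) : PySem.Dict String String :=
  l.foldl (fun d kv => if pvDropKeys.contains kv.1 then d else d.insert kv.1 kv.2) d

lemma foldA_eq_filter_fold (l : List (String × String)) (d : PySem.Dict String String) :
    (l.filter (fun kv => !(pvDropKeys.contains kv.1))).foldl (fun d kv => d.insert kv.1 kv.2) d
      = pvFoldA d l := by
  induction l generalizing d with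
  | nil => rfl
  | cons h t ih =>
    by_cases hm : h.1 ∈ pvDropKeys <;>
      simp [pvFoldA, hm] <;> simpa [pvFoldA] using ih _

-- two inserts at distinct keys commute when the first key is already present
lemma insert_comm_of_contains (d : PySem.Dict String String) (k q v w : String)
    (hk : d.contains k = true) (hne : q ≠ k) :
    (d.insert k v).insert q w = (d.insert q w).insert k v := by
  apply PySem.Dict.ext
  by_cases hq : d.contains q = true
  · simp [PySem.Dict.items_insert, hk, hq, PySem.Dict.contains_insert,
      List.map_map, Function.comp]
    intro a b _
    by_cases h1 : a = k <;> by_cases h2 : a = q <;> simp_all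
  · have hq' : d.contains q = false := by simpa using hq
    simp [PySem.Dict.items_insert, hk, hq', PySem.Dict.contains_insert, hne]

-- an insert at a key already present, untouched by the fold, floats out of the fold
lemma foldl_insert_of_contains (T : List (String × String)) (d : PySem.Dict String String)
    (k v : String) (hk : d.contains k = true) (hT : ∀ p ∈ T, p.1 ≠ k) :
    T.foldl pvIns (d.insert k v) = (T.foldl pvIns d).insert k v := by
  induction T generalizing d with
  | nil => rfl
  | cons q T ih =>
    have hq : q.1 ≠ k := hT q (List.mem_cons_self)
    have hcomm : pvIns (d.insert k v) q = (pvIns d q).insert k v := by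
      simpa [pvIns] using insert_comm_of_contains d k q.1 v q.2 hk hq
    simp only [List.foldl_cons, hcomm]
    exact ih (pvIns d q) (by simp [pvIns, PySem.Dict.contains_insert, hk])
      (fun p hp => hT p (List.mem_cons_of_mem q hp))

-- folding a replace-at-k list equals folding the original list then inserting (k, v)
lemma foldl_map_replace (L : List (String × String)) (d : PySem.Dict String String)
    (k v : String) (hmem : k ∈ L.map (·.1)) (hnd : (L.map (·.1)).Nodup) :
    (L.map (fun p => if p.1 == k then (k, v) else p)).foldl pvIns d
      = (L.foldl pvIns d).insert k v := by
  induction L generalizing d with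
  | nil => simp at hmem
  | cons p T ih =>
    by_cases hp : p.1 = k
    · subst hp
      have hT : ∀ q ∈ T, q.1 ≠ p.1 := by
        intro q hq
        simp only [List.map_cons, List.nodup_cons] at hnd
        exact fun h => hnd.1 (h ▸ List.mem_map_of_mem hq)
      have hrepl : T.map (fun q => if q.1 == p.1 then (p.1, v) else q) = T := by
        apply List.map_congr_left ?_ |>.trans (List.map_id T)
        intro q hq; simp [hT q hq]
      have hrw : (if (p.1 == p.1) = true then (p.1, v) else p) = (p.1, v) := by simp
      simp only [List.map_cons, hrw, List.foldl_cons, hrepl]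
      rw [← foldl_insert_of_contains T (pvIns d p) p.1 v
            (by simp [pvIns, PySem.Dict.contains_insert_self]) hT]
      have : pvIns d (p.1, v) = (pvIns d p).insert p.1 v := by
        simp [pvIns, PySem.Dict.insert_insert_self]
      rw [this]
    · have hmem' : k ∈ T.map (·.1) := by
        rcases List.mem_map.mp hmem with ⟨q, hq, hqk⟩
        rcases List.mem_cons.mp hq with h | h
        · exact absurd (h ▸ hqk) hp
        · exact hqk ▸ List.mem_map_of_mem h
      have hnd' : (T.map (·.1)).Nodup := by
        simp only [List.map_cons, List.nodup_cons] at hnd; exact hnd.2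
      have hrw : (if (p.1 == k) = true then (k, v) else p) = p := by simp [hp]
      simp only [List.map_cons, hrw, List.foldl_cons]
      exact ih (pvIns d p) hmem' hnd'

-- the items of e.insert k v, folded into d = the items of e folded into d, then insert
lemma foldl_items_insert (e : PySem.Dict String String) (d : PySem.Dict String String)
    (k v : String) (hnd : e.keys.Nodup) :
    (e.insert k v).items.foldl pvIns d = (e.items.foldl pvIns d).insert k v := by
  by_cases hc : e.contains k = true
  · rw [PySem.Dict.items_insert_of_contains _ _ hc]
    exact foldl_map_replace e.items d k v
      (by simpa [PySem.Dict.keys] using (PySem.Dict.contains_iff_mem_keys e k).mp hc)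
      (by simpa [PySem.Dict.keys] using hnd)
  · have hc' : e.contains k = false := by simpa using hc
    rw [PySem.Dict.items_insert_of_not_contains _ _ hc', List.foldl_append]
    rfl

-- merging a dict built by A's guarded fold on top of d = running the guarded fold from d
lemma merge_clean_eq_foldA (t : List (String × String)) (e d : PySem.Dict String String)
    (hnd : e.keys.Nodup) :
    (pvFoldA e t).items.foldl pvIns d = pvFoldA (e.items.foldl pvIns d) t := by
  induction t generalizing e d with
  | nil => rfl
  | cons h t ih =>
    obtain ⟨k, v⟩ := h
    by_cases hm : pvDropKeys.contains k = true
    · simp only [pvFoldA, List.foldl_cons, if_pos hm]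
      exact ih e d hnd
    · simp only [pvFoldA, List.foldl_cons, if_neg hm]
      have h1 := ih (e.insert k v) d (PySem.Dict.nodup_keys_insert _ _ _ hnd)
      simp only [pvFoldA] at h1
      rw [h1, foldl_items_insert e d k v hnd]

lemma cleanItems_eq_foldA (l : List (String × String)) :
    pvCleanItems l = pvFoldA PySem.Dict.empty l := by
  induction l with
  | nil => rfl
  | cons h t ih =>
    obtain ⟨k, v⟩ := h
    by_cases hm : pvDropKeys.contains k = true
    · simp only [pvCleanItems, pvFoldA, List.foldl_cons, if_pos hm]
      exact ih
    · simp only [pvCleanItems, pvFoldA, List.foldl_cons, if_neg hm]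
      rw [ih]
      have h1 := merge_clean_eq_foldA t PySem.Dict.empty
        (PySem.Dict.empty.insert k v) PySem.Dict.nodup_keys_empty
      simp only [pvFoldA] at h1
      exact h1

-- ===== VERDICT (by name: the statement is the Claim_ definition above) =====
theorem clean_registrar_dict_spec : Claim_equal_clean_registrar_dict := by
  intro l _ _
  unfold Spec_clean_registrar_dict clean_registrar_dict clean_registrar_dict_alt
  rw [cleanItems_eq_foldA, foldA_eq_filter_fold]
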